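-- pv_equiv track=rewrite | github.com/oalieno/beepub | backend/app/services/companion.py | _estimate_char_position
-- ===== SOURCE A (Python) =====
-- def _estimate_char_position(text: str, node_idx: int | None) -> int:
--     """Estimate character position from CFI node index.
--
--     EPUB CFI node indices roughly correspond to HTML element positions.
--     We split the text into paragraphs and map node_idx to a paragraph boundary.
--     node_idx is typically 2*paragraph_number (even = element, odd = text node).
--     """
--     if node_idx is None:
--         return len(text)
--
--     paragraphs = text.split("\n")
--     # node_idx/2 ≈ paragraph number (CFI uses even numbers for elements)
--     target_para = node_idx // 2
--     char_pos = 0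
--     for i, para in enumerate(paragraphs):
--         if i >= target_para:
--             break
--         char_pos += len(para) + 1  # +1 for the newline
--     return min(char_pos, len(text))
-- ===== SOURCE B (Python) =====
-- def _estimate_char_position(text: str, node_idx: int | None) -> int:
--     """Scan the raw string for newlines instead of splitting it into a paragraph list."""
--     if node_idx is None:
--         return len(text)
--     target_para = node_idx // 2
--     pos = 0
--     for _ in range(target_para):
--         idx = text.find("\n", pos)
--         if idx == -1:
--             return len(text)
--         pos = idx + 1
--     return min(pos, len(text))
-- ===== Notes on version B (the rewrite author's own statement) =====
-- stated objective: alternative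
-- what changed: B never builds a paragraph list: it advances a cursor through the raw string with repeated find('\n', pos) and returns as soon as the target paragraph (or the last newline) is reached, whereas A splits the whole text and sums paragraph lengths.
import Mathlib
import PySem

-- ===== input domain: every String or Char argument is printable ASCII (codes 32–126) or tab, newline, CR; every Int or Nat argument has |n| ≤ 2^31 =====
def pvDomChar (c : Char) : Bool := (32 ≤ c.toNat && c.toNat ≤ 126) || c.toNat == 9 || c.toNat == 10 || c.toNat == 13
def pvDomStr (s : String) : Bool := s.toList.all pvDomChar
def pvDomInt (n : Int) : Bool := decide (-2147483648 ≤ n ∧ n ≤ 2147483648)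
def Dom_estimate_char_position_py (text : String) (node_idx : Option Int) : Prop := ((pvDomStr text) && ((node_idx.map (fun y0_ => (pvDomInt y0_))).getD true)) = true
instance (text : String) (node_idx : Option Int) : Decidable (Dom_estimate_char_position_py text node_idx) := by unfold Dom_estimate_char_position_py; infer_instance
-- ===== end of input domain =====

-- B replaces A's split-into-paragraphs-and-sum by a cursor that repeatedly finds the next
-- newline in the raw string and stops early, building no list (objective: alternative).

-- ===== PORT A =====
-- for i, para in enumerate(paragraphs): if i >= target_para: break; char_pos += len(para) + 1
def pvALoop : List (List Char) → Int → Int → Int → Int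
  | [], _, _, acc => acc
  | p :: rest, i, target, acc =>
    if i ≥ target then acc else pvALoop rest (i + 1) target (acc + p.length + 1)

def estimate_char_position_py (text : String) (node_idx : Option Int) : Int :=
  match node_idx with
  | none => PySem.Str.len text
  | some n =>
    let paragraphs := PySem.Chars.splitOn text.toList ['\n']   -- text.split("\n")
    let target_para := PySem.Int.floordiv n 2
    min (pvALoop paragraphs 0 target_para 0) (PySem.Str.len text)

-- ===== PORT B =====
-- for _ in range(target_para): idx = text.find("\n", pos); if idx == -1: return len(text); pos = idx + 1
-- (range(target_para) runs max(target_para, 0) times, hence the Nat fuel .toNat)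
def pvBLoop (s : List Char) : Nat → Int → Int
  | 0, pos => min pos (s.length : Int)
  | k + 1, pos =>
    let idx := PySem.Chars.findFrom s ['\n'] pos none
    if idx = -1 then (s.length : Int) else pvBLoop s k (idx + 1)

def estimate_char_position_py_alt (text : String) (node_idx : Option Int) : Int :=
  match node_idx with
  | none => PySem.Str.len text
  | some n => pvBLoop text.toList ((PySem.Int.floordiv n 2).toNat) 0

-- ===== PRECONDITION & SPEC =====
def Spec_estimate_char_position_py (text : String) (node_idx : Option Int) (out : Int) : Prop := out = estimate_char_position_py_alt text node_idx
instance (text : String) (node_idx : Option Int) (out : Int) : Decidable (Spec_estimate_char_position_py text node_idx out) := by unfold Spec_estimate_char_position_py; infer_instance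

-- ===== CLAIM (what is proved, stated in full; the proofs are below) =====
def Claim_equal_estimate_char_position_py : Prop := ∀ (text : String) (node_idx : Option Int), Dom_estimate_char_position_py text node_idx → Spec_estimate_char_position_py text node_idx (estimate_char_position_py text node_idx)

-- ===== LEMMAS AND PROOFS =====

-- common spec: pvQ r k = number of chars consumed by passing the first k newline-terminated
-- pieces of r (one past the end, r.length + 1, if r has fewer than k newlines)
def pvQ : List Char → Nat → Int
  | _, 0 => 0
  | [], _ + 1 => 1
  | c :: r, k + 1 => if c = '\n' then 1 + pvQ r k else 1 + pvQ r (k + 1)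

-- clean structural form of Chars.splitOn on a single-char separator
def pvClean : List Char → List Char → List (List Char)
  | [], cur => [cur.reverse]
  | c :: rest, cur => if c = '\n' then cur.reverse :: pvClean rest [] else pvClean rest (c :: cur)

theorem pvSplitOn_go_eq (l : List Char) : ∀ (fuel : Nat) (cur : List Char) (acc : List (List Char)),
    l.length ≤ fuel →
    PySem.Chars.splitOn.go ['\n'] fuel l cur acc = acc.reverse ++ pvClean l cur := by
  induction l with
  | nil =>
    intro fuel cur acc _
    cases fuel <;> simp [PySem.Chars.splitOn.go, pvClean]
  | cons c rest ih =>
    intro fuel cur acc hf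
    cases fuel with
    | zero => simp at hf
    | succ f =>
      by_cases hc : c = '\n'
      · subst hc
        rw [show PySem.Chars.splitOn.go ['\n'] (f+1) ('\n' :: rest) cur acc
              = PySem.Chars.splitOn.go ['\n'] f rest [] (cur.reverse :: acc) by
            simp [PySem.Chars.splitOn.go, List.isPrefixOf]]
        rw [ih f [] (cur.reverse :: acc) (by simpa using hf)]
        simp [pvClean]
      · rw [show PySem.Chars.splitOn.go ['\n'] (f+1) (c :: rest) cur acc
              = PySem.Chars.splitOn.go ['\n'] f rest (c :: cur) acc by
            simp [PySem.Chars.splitOn.go, List.isPrefixOf]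
            exact fun h => (hc h.symm).elim]
        rw [ih f (c :: cur) acc (by simpa using hf)]
        simp [pvClean, hc]

theorem pvSplitOn_eq (s : List Char) : PySem.Chars.splitOn s ['\n'] = pvClean s [] := by
  rw [show PySem.Chars.splitOn s ['\n'] = PySem.Chars.splitOn.go ['\n'] (s.length + 1) s [] [] from rfl]
  rw [pvSplitOn_go_eq s (s.length + 1) [] [] (by omega)]
  rfl

-- A's loop with an Int counter = fuel (target - i).toNat over the list
def pvA' : List (List Char) → Nat → Int
  | _, 0 => 0
  | [], _ + 1 => 0
  | p :: ps, k + 1 => (p.length + 1) + pvA' ps k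

theorem pvA'_nil (k : Nat) : pvA' [] k = 0 := by cases k <;> rfl

theorem pvA'_zero (ps : List (List Char)) : pvA' ps 0 = 0 := by cases ps <;> rfl

theorem pvQ_zero (r : List Char) : pvQ r 0 = 0 := by cases r <;> rfl

theorem pvALoop_eq (ps : List (List Char)) : ∀ (i target acc : Int),
    pvALoop ps i target acc = acc + pvA' ps (target - i).toNat := by
  induction ps with
  | nil => intro i t acc; simp [pvALoop, pvA'_nil]
  | cons p ps ih =>
    intro i t acc
    by_cases h : i ≥ t
    · have h0 : (t - i).toNat = 0 := by omega
      simp [pvALoop, h, h0, pvA']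
    · have hk : (t - i).toNat = (t - (i + 1)).toNat + 1 := by omega
      simp only [pvALoop, if_neg h]
      rw [ih (i + 1) t (acc + ↑p.length + 1), hk]
      show _ = acc + ((↑p.length + 1) + pvA' ps (t - (i + 1)).toNat)
      ring

theorem pvA'_clean (r : List Char) : ∀ (cur : List Char) (k : Nat),
    pvA' (pvClean r cur) (k + 1) = cur.length + pvQ r (k + 1) := by
  induction r with
  | nil => intro cur k; simp [pvClean, pvA', pvQ, pvA'_nil]
  | cons c rest ih =>
    intro cur k
    by_cases hc : c = '\n'
    · subst hc
      rw [show pvClean ('\n' :: rest) cur = cur.reverse :: pvClean rest [] from rfl]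
      rw [show pvQ ('\n' :: rest) (k + 1) = 1 + pvQ rest k from rfl]
      cases k with
      | zero =>
        rw [show pvA' (cur.reverse :: pvClean rest []) 1 = (↑cur.reverse.length + 1) + pvA' (pvClean rest []) 0 from rfl]
        simp [pvA'_zero, pvQ_zero]
      | succ k' =>
        rw [show pvA' (cur.reverse :: pvClean rest []) (k' + 1 + 1) = (↑cur.reverse.length + 1) + pvA' (pvClean rest []) (k' + 1) from rfl]
        rw [ih [] k']
        simp
        ring
    · rw [show pvClean (c :: rest) cur = pvClean rest (c :: cur) by simp [pvClean, hc]]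
      rw [show pvQ (c :: rest) (k + 1) = 1 + pvQ rest (k + 1) by simp [pvQ, hc]]
      rw [ih (c :: cur) k]
      push_cast [List.length_cons]
      ring

-- pvQ when r has no newline
theorem pvQ_no_newline (r : List Char) (h : '\n' ∉ r) (k : Nat) :
    pvQ r (k + 1) = r.length + 1 := by
  induction r with
  | nil => simp [pvQ]
  | cons c rest ih =>
    have hc : c ≠ '\n' := fun hh => h (hh ▸ List.mem_cons_self)
    have hr : '\n' ∉ rest := fun hh => h (List.mem_cons_of_mem _ hh)
    rw [show pvQ (c :: rest) (k + 1) = 1 + pvQ rest (k + 1) by simp [pvQ, hc]]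
    rw [ih hr]
    push_cast [List.length_cons]
    ring

-- pvQ splits at the first newline
theorem pvQ_first_newline (r : List Char) : ∀ (j : Nat), r[j]? = some '\n' →
    (∀ i, i < j → r[i]? ≠ some '\n') → ∀ k, pvQ r (k + 1) = (j + 1) + pvQ (r.drop (j + 1)) k := by
  induction r with
  | nil => intro j hj; simp at hj
  | cons c rest ih =>
    intro j hget hprev k
    cases j with
    | zero =>
      have : c = '\n' := by simpa using hget
      subst this
      simp [pvQ]
    | succ j' =>
      have hc : c ≠ '\n' := by
        have := hprev 0 (by omega)
        simpa using this
      have hget' : rest[j']? = some '\n' := by simpa using hget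
      have hprev' : ∀ i, i < j' → rest[i]? ≠ some '\n' := by
        intro i hi
        have := hprev (i + 1) (by omega)
        simpa using this
      rw [show pvQ (c :: rest) (k + 1) = 1 + pvQ rest (k + 1) by simp [pvQ, hc]]
      rw [ih j' hget' hprev' k, List.drop_succ_cons]
      push_cast
      ring

theorem pvBLoop_eq (s : List Char) : ∀ (k : Nat) (pos : Nat), pos ≤ s.length →
    pvBLoop s k (pos : Int) = min ((pos : Int) + pvQ (s.drop pos) k) (s.length : Int) := by
  intro k
  induction k with
  | zero => intro pos hpos; simp [pvBLoop, pvQ_zero]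
  | succ k ih =>
    intro pos hpos
    rw [show pvBLoop s (k + 1) (pos : Int)
          = (if PySem.Chars.findFrom s ['\n'] (pos : Int) none = -1 then (s.length : Int)
             else pvBLoop s k (PySem.Chars.findFrom s ['\n'] (pos : Int) none + 1)) from rfl]
    rw [PySem.Chars.findFrom_natCast s ['\n'] pos hpos]
    by_cases hfind : PySem.Chars.find (s.drop pos) ['\n'] = -1
    · rw [if_pos (by simp [hfind])]
      have hmem : '\n' ∉ s.drop pos := by
        have hni := (PySem.Chars.find_eq_neg_one_iff (s.drop pos) ['\n']).mp hfind
        intro hmem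
        exact hni ((List.singleton_infix_iff '\n' (s.drop pos)).mpr hmem)
      rw [pvQ_no_newline _ hmem k]
      simp only [List.length_drop]
      have h0 : ((s.length - pos : Nat) : Int) = (s.length : Int) - pos := by omega
      rw [h0]
      omega
    · have hge : 0 ≤ PySem.Chars.find (s.drop pos) ['\n'] := by
        have := PySem.Chars.neg_one_le_find (s.drop pos) ['\n']
        omega
      set f := PySem.Chars.find (s.drop pos) ['\n'] with hf
      obtain ⟨hpre, hmin⟩ := PySem.Chars.find_spec hge
      have hjlt : f.toNat < (s.drop pos).length := by
        rcases hpre with ⟨t, ht⟩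
        have hlen := congrArg List.length ht
        simp at hlen
        simp only [List.length_drop]
        omega
      have hifneg : ¬ ((if f = -1 then (-1 : Int) else (pos : Int) + f) = -1) := by
        rw [if_neg hfind]; omega
      rw [if_neg hifneg, if_neg hfind]
      have hpos' : pos + f.toNat + 1 ≤ s.length := by
        have := List.length_drop (l := s) (i := pos)
        omega
      have hcast : (pos : Int) + f + 1 = ((pos + f.toNat + 1 : Nat) : Int) := by
        push_cast; omega
      rw [hcast, ih (pos + f.toNat + 1) hpos']
      have hdrop : s.drop (pos + f.toNat + 1) = (s.drop pos).drop (f.toNat + 1) := by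
        rw [List.drop_drop]; ring_nf
      have hgetj : (s.drop pos)[f.toNat]? = some '\n' := by
        rcases hpre with ⟨t, ht⟩
        have h0 : ((s.drop pos).drop f.toNat)[0]? = some '\n' := by rw [← ht]; rfl
        rw [List.getElem?_drop] at h0
        simpa using h0
      have hprevj : ∀ i, i < f.toNat → (s.drop pos)[i]? ≠ some '\n' := by
        intro i hi hcontra
        apply hmin i hi
        have hil : i < (s.drop pos).length := by omega
        have hgi : (s.drop pos)[i] = '\n' := by
          have := List.getElem?_eq_getElem hil
          rw [this] at hcontra
          simpa using hcontra
        refine ⟨(s.drop pos).drop (i + 1), ?_⟩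
        simp only [List.singleton_append]
        rw [← hgi]
        exact List.getElem_cons_drop hil
      rw [pvQ_first_newline (s.drop pos) f.toNat hgetj hprevj k, hdrop]
      push_cast
      omega

-- ===== VERDICT (by name: the statement is the Claim_ definition above) =====
theorem estimate_char_position_py_spec : Claim_equal_estimate_char_position_py := by
  intro text node_idx _
  unfold Spec_estimate_char_position_py estimate_char_position_py estimate_char_position_py_alt
  cases node_idx with
  | none => rfl
  | some n =>
    simp only
    have hb := pvBLoop_eq text.toList ((PySem.Int.floordiv n 2).toNat) 0 (by omega)
    simp only [Nat.cast_zero] at hb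
    rw [pvSplitOn_eq, pvALoop_eq, hb, PySem.Str.len_eq, List.drop_zero]
    cases hk : (PySem.Int.floordiv n 2).toNat with
    | zero =>
      rw [show (PySem.Int.floordiv n 2 - 0).toNat = 0 by omega]
      rw [pvA'_zero, pvQ_zero]
    | succ k =>
      rw [show (PySem.Int.floordiv n 2 - 0).toNat = k + 1 by omega]
      rw [pvA'_clean]
      simp
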